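-- pv_equiv track=rewrite | github.com/robyfirnandoyusuf/SheleftmeCipher | SheleftmeCipher.py | embed_message_in_text
-- ===== SOURCE A (Python) =====
-- def embed_message_in_text(cover_text, encoded_message):
--     cover_length = len(cover_text)
--     message_length = len(encoded_message)
--
--     interval = max(1, cover_length // message_length)
--     embedded_text = ""
--     index = 0
--
--     for i in range(cover_length):
--         embedded_text += cover_text[i]
--         if index < message_length and (i + 1) % interval == 0:
--             embedded_text += encoded_message[index]
--             index += 1
--
--     if index < message_length:
--         embedded_text += encoded_message[index:]
--
--     return embedded_text
-- ===== SOURCE B (Python) =====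
-- def embed_message_in_text(cover_text, encoded_message):
--     cover_length = len(cover_text)
--     message_length = len(encoded_message)
--     interval = max(1, cover_length // message_length)
--     k = min(message_length, cover_length // interval)
--     blocks = [cover_text[j * interval:(j + 1) * interval] + encoded_message[j]
--               for j in range(k)]
--     return "".join(blocks) + cover_text[k * interval:] + encoded_message[k:]
-- ===== Notes on version B (the rewrite author's own statement) =====
-- stated objective: alternative
-- what changed: B replaces A's stateful per-character loop with a modulus test and running message index by a stateless closed form: it computes the number of insertions k = min(message_length, cover_length // interval) up front, builds the k (block + message char) pieces by a comprehension, and appends the trailing cover and message slices.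
import Mathlib
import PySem

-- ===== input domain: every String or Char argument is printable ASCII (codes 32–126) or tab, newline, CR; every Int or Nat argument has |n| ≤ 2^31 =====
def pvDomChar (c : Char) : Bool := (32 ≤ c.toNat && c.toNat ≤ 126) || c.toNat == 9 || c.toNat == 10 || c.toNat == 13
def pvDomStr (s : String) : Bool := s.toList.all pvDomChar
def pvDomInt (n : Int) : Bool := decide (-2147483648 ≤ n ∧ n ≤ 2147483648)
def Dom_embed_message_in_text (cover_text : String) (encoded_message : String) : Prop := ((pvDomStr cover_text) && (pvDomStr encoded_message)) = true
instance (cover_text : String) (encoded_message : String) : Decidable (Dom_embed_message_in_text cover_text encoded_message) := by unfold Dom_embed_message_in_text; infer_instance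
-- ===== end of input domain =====

-- B computes the number of insertions k = min(M, L // interval) in closed form and builds the
-- result from k (block ++ message char) pieces plus two trailing slices, with no per-character
-- state; objective: alternative stateless decomposition, same cost.

-- ===== PORT A =====
-- loop body of A's `for i in range(cover_length)` (state = (embedded_text, index))
def pvStepA (cs ms : List Char) (message_length interval : Int)
    (st : List Char × Int) (i : Int) : List Char × Int :=
  let em := st.1 ++ [PySem.List.pyGetD cs i ' ']
  if st.2 < message_length ∧ PySem.Int.mod (i + 1) interval = 0 then
    (em ++ [PySem.List.pyGetD ms st.2 ' '], st.2 + 1)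
  else (em, st.2)

def embed_message_in_text (cover_text : String) (encoded_message : String) : String :=
  let cs := cover_text.toList
  let ms := encoded_message.toList
  let cover_length : Int := PySem.List.len cs
  let message_length : Int := PySem.List.len ms
  let interval : Int := max 1 (PySem.Int.floordiv cover_length message_length)
  let r := (PySem.List.pyRange 0 cover_length 1).foldl
      (pvStepA cs ms message_length interval) ([], 0)
  let em := if r.2 < message_length then r.1 ++ PySem.List.slice ms (some r.2) none else r.1
  String.ofList em

-- ===== PORT B =====
def embed_message_in_text_alt (cover_text : String) (encoded_message : String) : String :=
  let cs := cover_text.toList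
  let ms := encoded_message.toList
  let cover_length : Int := PySem.List.len cs
  let message_length : Int := PySem.List.len ms
  let interval : Int := max 1 (PySem.Int.floordiv cover_length message_length)
  let k : Int := min message_length (PySem.Int.floordiv cover_length interval)
  let blocks := (PySem.List.pyRange 0 k 1).map (fun j =>
      PySem.List.slice cs (some (j * interval)) (some ((j + 1) * interval))
        ++ [PySem.List.pyGetD ms j ' '])
  String.ofList (blocks.flatten
    ++ PySem.List.slice cs (some (k * interval)) none
    ++ PySem.List.slice ms (some k) none)

-- ===== PRECONDITION & SPEC =====
-- Pre_ excludes exactly the empty message, on which A (and B alike) raises ZeroDivisionError.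
def Pre_embed_message_in_text (cover_text : String) (encoded_message : String) : Prop :=
  encoded_message ≠ ""
instance (cover_text : String) (encoded_message : String) : Decidable (Pre_embed_message_in_text cover_text encoded_message) := by unfold Pre_embed_message_in_text; infer_instance

def pvWitness_embed_message_in_text : String × String := ("hello world", "hi")

def Spec_embed_message_in_text (cover_text : String) (encoded_message : String) (out : String) : Prop := out = embed_message_in_text_alt cover_text encoded_message
instance (cover_text : String) (encoded_message : String) (out : String) : Decidable (Spec_embed_message_in_text cover_text encoded_message out) := by unfold Spec_embed_message_in_text; infer_instance

-- ===== CLAIM (what is proved, stated in full; the proofs are below) =====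
def Claim_equal_embed_message_in_text : Prop := ∀ (cover_text : String) (encoded_message : String), Dom_embed_message_in_text cover_text encoded_message → Pre_embed_message_in_text cover_text encoded_message → Spec_embed_message_in_text cover_text encoded_message (embed_message_in_text cover_text encoded_message)

-- ===== LEMMAS AND PROOFS =====

-- a fold of pvStepA over indices where the modulus test never fires just appends the chars
theorem pvFoldA_nofire (cs ms : List Char) (M t : Int) (l : List Int) (acc : List Char) (idx : Int)
    (h : ∀ i ∈ l, PySem.Int.mod (i + 1) t ≠ 0) :
    l.foldl (pvStepA cs ms M t) (acc, idx)
      = (acc ++ l.map (fun i => PySem.List.pyGetD cs i ' '), idx) := by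
  induction l generalizing acc with
  | nil => simp
  | cons x xs ih =>
    have hx := h x (by simp)
    simp only [List.foldl_cons, pvStepA, if_neg (by tauto : ¬ (idx < M ∧ PySem.Int.mod (x+1) t = 0))]
    rw [ih _ (fun i hi => h i (by simp [hi]))]
    simp

-- once the message is exhausted the fold likewise just appends the chars
theorem pvFoldA_done (cs ms : List Char) (M t : Int) (l : List Int) (acc : List Char) (idx : Int)
    (h : ¬ idx < M) :
    l.foldl (pvStepA cs ms M t) (acc, idx)
      = (acc ++ l.map (fun i => PySem.List.pyGetD cs i ' '), idx) := by
  induction l generalizing acc with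
  | nil => simp
  | cons x xs ih =>
    simp only [List.foldl_cons, pvStepA, if_neg (by tauto : ¬ (idx < M ∧ PySem.Int.mod (x+1) t = 0))]
    rw [ih _]
    simp

-- chars read along pyRange a b 1 form the slice cs[a:b]
theorem pvMapGet (cs : List Char) (a b : Int) (ha : 0 ≤ a) (hab : a ≤ b) (hb : b ≤ (cs.length : Int)) :
    (PySem.List.pyRange a b 1).map (fun i => PySem.List.pyGetD cs i ' ')
      = (cs.drop a.toNat).take (b - a).toNat := by
  have hsplit : PySem.List.pyRange a (PySem.List.len cs) 1
      = PySem.List.pyRange a b 1 ++ PySem.List.pyRange b (PySem.List.len cs) 1 := by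
    apply PySem.List.pyRange_one_append a b _ hab (by simpa [PySem.List.len_eq])
  have hfull := PySem.List.map_pyGetD_pyRange cs ' ' ha
  rw [hsplit, List.map_append] at hfull
  have hlen : ((PySem.List.pyRange a b 1).map (fun i => PySem.List.pyGetD cs i ' ')).length = (b - a).toNat := by
    simp [PySem.List.length_pyRange_one]
  rw [← hfull, ← hlen, List.take_left]

-- no multiple of t strictly between s and s+t, given t ∣ s
theorem pvNoFire (s t : Int) (hdvd : t ∣ s) (i : Int)
    (h1 : s ≤ i) (h2 : i + 1 < s + t) : PySem.Int.mod (i + 1) t ≠ 0 := by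
  intro hmod
  rw [PySem.Int.mod_eq_zero_iff_dvd] at hmod
  have h3 : t ∣ (i + 1 - s) := hmod.sub hdvd
  have h4 : 0 < i + 1 - s := by omega
  have := Int.le_of_dvd h4 h3
  omega

-- one full block starting at a multiple s of t, with message chars remaining:
-- the test fires exactly at the block's last index, appending cs[s:s+t] and one message char
theorem pvBlockA (cs ms : List Char) (t : Int) (ht : 0 < t) (s : Int) (acc : List Char) (idx : Int)
    (hs : 0 ≤ s) (hdvd : t ∣ s) (hfull : s + t ≤ (cs.length : Int)) (hidx : idx < (ms.length : Int)) :
    (PySem.List.pyRange s (s + t) 1).foldl (pvStepA cs ms (ms.length : Int) t) (acc, idx)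
      = (acc ++ PySem.List.slice cs (some s) (some (s + t)) ++ [PySem.List.pyGetD ms idx ' '], idx + 1) := by
  have hchunk : PySem.List.pyRange s (s + t) 1
      = PySem.List.pyRange s (s + t - 1) 1 ++ [s + t - 1] := by
    rw [PySem.List.pyRange_one_append s (s + t - 1) (s + t) (by omega) (by omega)]
    congr 1
    have h1 := PySem.List.pyRange_one_singleton (s + t - 1)
    rw [show (s + t - 1) + 1 = s + t from by ring] at h1
    exact h1
  rw [hchunk, List.foldl_append]
  rw [pvFoldA_nofire cs ms _ t _ acc idx (fun i hi => by
    rw [PySem.List.mem_pyRange_one] at hi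
    exact pvNoFire s t hdvd i hi.1 (by omega))]
  rw [pvMapGet cs s (s + t - 1) hs (by omega) (by omega)]
  have hfire : PySem.Int.mod (s + t - 1 + 1) t = 0 := by
    rw [PySem.Int.mod_eq_zero_iff_dvd]
    rw [show s + t - 1 + 1 = s + t from by ring]
    exact dvd_add hdvd (dvd_refl t)
  have hslice : PySem.List.slice cs (some s) (some (s + t))
      = (cs.drop s.toNat).take (t.toNat) := by
    rw [PySem.List.slice_toNat cs hs (by omega)]
    congr 1; omega
  have hget : PySem.List.pyGetD cs (s + t - 1) ' '
      = (cs.drop s.toNat)[(t - 1).toNat]'(by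
          rw [List.length_drop]; omega) := by
    rw [PySem.List.pyGetD_eq_getElem cs ' ' (by omega : (0:Int) ≤ s + t - 1)
      (by exact_mod_cast (by omega : s + t - 1 < (cs.length : Int)))]
    rw [List.getElem_drop]
    congr 1; omega
  have htake : (cs.drop s.toNat).take ((s + t - 1 - s).toNat)
        ++ [PySem.List.pyGetD cs (s + t - 1) ' ']
      = PySem.List.slice cs (some s) (some (s + t)) := by
    rw [hslice, hget]
    have h1 : (s + t - 1 - s).toNat = (t - 1).toNat := by omega
    have h2 : t.toNat = (t - 1).toNat + 1 := by omega
    rw [h1, h2, List.take_add_one]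
    congr 1
    rw [List.getElem?_eq_getElem (by rw [List.length_drop]; omega)]
    simp
  simp only [List.foldl_cons, List.foldl_nil, pvStepA, hfire, and_true, if_pos hidx]
  rw [← htake]
  simp

-- phase 1: the first j full blocks of A's loop produce exactly B's first j pieces, index = j
theorem pvPhase1 (cs ms : List Char) (t : Int) (ht : 0 < t)
    (k : Int) (hkM : k ≤ (ms.length : Int)) (hkL : k * t ≤ (cs.length : Int)) :
    ∀ (j : Nat), (j : Int) ≤ k →
      (PySem.List.pyRange 0 ((j : Int) * t) 1).foldl (pvStepA cs ms (ms.length : Int) t) ([], 0)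
        = (((PySem.List.pyRange 0 (j : Int) 1).map (fun j =>
            PySem.List.slice cs (some (j * t)) (some ((j + 1) * t))
              ++ [PySem.List.pyGetD ms j ' '])).flatten, (j : Int)) := by
  intro j
  induction j with
  | zero =>
    intro _
    push_cast
    rw [zero_mul, PySem.List.pyRange_one_eq_nil (le_refl 0)]
    simp
  | succ j ih =>
    intro hj
    have hj' : (j : Int) ≤ k := by push_cast at hj ⊢; omega
    have hjk : (j : Int) < k := by push_cast at hj; omega
    have hsplit : PySem.List.pyRange 0 (((j + 1 : Nat) : Int) * t) 1
        = PySem.List.pyRange 0 ((j : Int) * t) 1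
          ++ PySem.List.pyRange ((j : Int) * t) (((j + 1 : Nat) : Int) * t) 1 := by
      apply PySem.List.pyRange_one_append
      · positivity
      · push_cast; nlinarith
    rw [hsplit, List.foldl_append, ih hj']
    have hcast : ((j + 1 : Nat) : Int) * t = (j : Int) * t + t := by push_cast; ring
    rw [hcast]
    rw [pvBlockA cs ms t ht ((j : Int) * t) _ (j : Int)
      (by positivity) (dvd_mul_left t (j : Int))
      (by nlinarith [hkL, hjk] : (j : Int) * t + t ≤ (cs.length : Int))
      (by omega : (j : Int) < (ms.length : Int))]
    have hmap : PySem.List.pyRange 0 ((j : Int) + 1) 1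
        = PySem.List.pyRange 0 (j : Int) 1 ++ [(j : Int)] := by
      rw [PySem.List.pyRange_one_append 0 (j : Int) ((j : Int) + 1) (by positivity) (by omega)]
      rw [PySem.List.pyRange_one_singleton]
    push_cast
    rw [hmap]
    simp [List.flatten_append]
    rw [show ((j : Int) + 1) * t = (j : Int) * t + t from by ring]

-- phase 2: from k*t on, no further insertion happens; the rest of the cover is appended
theorem pvPhase2 (cs ms : List Char) (t : Int) (ht : 0 < t)
    (k : Int) (hk0 : 0 ≤ k) (hkL : k * t ≤ (cs.length : Int))
    (hstop : k = (ms.length : Int) ∨ (cs.length : Int) < k * t + t)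
    (acc : List Char) :
    (PySem.List.pyRange (k * t) (cs.length : Int) 1).foldl (pvStepA cs ms (ms.length : Int) t) (acc, k)
      = (acc ++ cs.drop (k * t).toNat, k) := by
  have hmap : (PySem.List.pyRange (k * t) (cs.length : Int) 1).map
      (fun i => PySem.List.pyGetD cs i ' ') = cs.drop (k * t).toNat := by
    rw [pvMapGet cs (k * t) (cs.length : Int) (by positivity) hkL (le_refl _)]
    exact List.take_of_length_le (by rw [List.length_drop]; omega)
  rcases hstop with hM | hpart
  · rw [pvFoldA_done cs ms _ t _ acc k (by omega), hmap]
  · rw [pvFoldA_nofire cs ms _ t _ acc k (fun i hi => by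
      rw [PySem.List.mem_pyRange_one] at hi
      exact pvNoFire (k * t) t (dvd_mul_left t k) i hi.1 (by omega)), hmap]

-- ===== VERDICT (by name: the statement is the Claim_ definition above) =====
theorem embed_message_in_text_spec : Claim_equal_embed_message_in_text := by
  intro cover_text encoded_message _hdom _hpre
  unfold Spec_embed_message_in_text embed_message_in_text embed_message_in_text_alt
  simp only [PySem.List.len_eq]
  set cs := cover_text.toList with hcs
  set ms := encoded_message.toList with hms
  set L : Int := (cs.length : Int) with hL
  set M : Int := (ms.length : Int) with hM
  set t : Int := max 1 (PySem.Int.floordiv L M) with htdef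
  have ht : 0 < t := by positivity
  set nf : Int := PySem.Int.floordiv L t with hnf
  have hnfe : nf = L / t := by rw [hnf, PySem.Int.floordiv_eq_ediv_of_pos ht]
  have hL0 : 0 ≤ L := by rw [hL]; positivity
  have hde : t * (L / t) + L % t = L := Int.mul_ediv_add_emod L t
  have hr0 : 0 ≤ L % t := Int.emod_nonneg L (ne_of_gt ht)
  have hrt : L % t < t := Int.emod_lt_of_pos L ht
  have hnfL : nf * t ≤ L := by rw [hnfe]; nlinarith
  have hLnf : L < nf * t + t := by rw [hnfe]; nlinarith
  have hnf0 : 0 ≤ nf := by rw [hnfe]; exact Int.ediv_nonneg hL0 (le_of_lt ht)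
  set k : Int := min M nf with hk
  have hk0 : 0 ≤ k := by rw [hk]; exact le_min (by rw [hM]; positivity) hnf0
  have hkM : k ≤ M := min_le_left _ _
  have hkL : k * t ≤ L := le_trans (by nlinarith [min_le_right M nf]) hnfL
  have hstop : k = M ∨ L < k * t + t := by
    by_cases h : M ≤ nf
    · left; rw [hk]; omega
    · right
      have : k = nf := by rw [hk]; omega
      rw [this]; exact hLnf
  -- split A's loop at k*t
  have hsplit : PySem.List.pyRange 0 L 1
      = PySem.List.pyRange 0 (k * t) 1 ++ PySem.List.pyRange (k * t) L 1 :=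
    PySem.List.pyRange_one_append 0 (k * t) L (by positivity) hkL
  rw [hsplit, List.foldl_append]
  have hcast : ((k.toNat : Nat) : Int) = k := Int.toNat_of_nonneg hk0
  have hp1 := pvPhase1 cs ms t ht k hkM hkL k.toNat (by omega)
  rw [hcast] at hp1
  rw [hp1, pvPhase2 cs ms t ht k hk0 hkL hstop _]
  -- assemble
  have hsliceC : PySem.List.slice cs (some (k * t)) none = cs.drop (k * t).toNat :=
    PySem.List.slice_from cs (by positivity)
  rw [hsliceC]
  by_cases hlt : k < M
  · rw [if_pos hlt]
  · rw [if_neg hlt]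
    have hkMe : k = M := by omega
    have hempty : PySem.List.slice ms (some k) none = [] := by
      rw [PySem.List.slice_from ms hk0]
      exact List.drop_eq_nil_of_le (by omega)
    rw [hempty]
    simp
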